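-- pv_equiv track=rewrite | github.com/nickmyatt/codility | prime_and_composite_numbers/peaks.py | calc_prefix_peaks
-- ===== SOURCE A (Python) =====
-- from itertools import izip
--
-- def calc_prefix_peaks(seq):
--     if len(seq) < 3:
--         return []
--     triples = izip(seq, seq[1:], seq[2:])
--     res = [0]
--     count = 0
--     for l, peak, r in triples:
--         if l < peak > r:
--             count += 1
--         res.append(count)
--     res.append(count)
--     return res
-- ===== SOURCE B (Python) =====
-- def calc_prefix_peaks(seq):
--     n = len(seq)
--     if n < 3:
--         return []
--     peaks = [j for j in range(1, n - 1) if seq[j - 1] < seq[j] > seq[j + 1]]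
--     res = []
--     for i in range(n):
--         lo, hi = 0, len(peaks)
--         while lo < hi:
--             mid = (lo + hi) // 2
--             if peaks[mid] <= i:
--                 lo = mid + 1
--             else:
--                 hi = mid
--         res.append(lo)
--     return res
-- ===== Notes on version B (the rewrite author's own statement) =====
-- stated objective: alternative
-- what changed: B abandons A's single fused pass that threads a running counter through the output: it first collects the (sorted) list of peak positions, then computes every output entry independently as the number of peak positions <= that index, found by a hand-written binary search (bisect_right) over the peak list.
import Mathlib
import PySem

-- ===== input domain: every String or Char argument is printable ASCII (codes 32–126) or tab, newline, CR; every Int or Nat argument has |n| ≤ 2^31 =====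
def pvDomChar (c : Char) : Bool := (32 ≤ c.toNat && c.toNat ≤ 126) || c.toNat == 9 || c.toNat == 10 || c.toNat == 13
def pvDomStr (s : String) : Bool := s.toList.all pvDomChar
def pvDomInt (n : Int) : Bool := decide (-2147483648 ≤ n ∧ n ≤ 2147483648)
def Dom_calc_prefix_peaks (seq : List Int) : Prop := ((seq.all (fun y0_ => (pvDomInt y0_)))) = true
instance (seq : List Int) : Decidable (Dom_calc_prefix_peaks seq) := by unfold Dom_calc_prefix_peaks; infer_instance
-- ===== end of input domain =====

-- B replaces A's fused running-counter pass by a different algorithm: collect the sorted list of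
-- peak positions once, then find each output entry independently by binary search in that list
-- (number of peak positions ≤ the output index).

-- ===== PORT A =====
-- the for-loop over izip(seq, seq[1:], seq[2:]) with state (res, count)
def pvALoop : List ((Int × Int) × Int) → List Int → Int → (List Int × Int)
  | [], res, count => (res, count)
  | ((l, p), r) :: ts, res, count =>
      let count' := if l < p ∧ p > r then count + 1 else count
      pvALoop ts (res ++ [count']) count'

def calc_prefix_peaks (seq : List Int) : List Int :=
  if seq.length < 3 then []
  else
    let triples := (seq.zip (PySem.List.slice seq (some 1) none)).zip (PySem.List.slice seq (some 2) none)
    let rc := pvALoop triples [0] 0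
    rc.1 ++ [rc.2]

-- ===== PORT B =====
-- peaks = [j for j in range(1, n - 1) if seq[j-1] < seq[j] > seq[j+1]]
-- (indices are always in range here, so pyGetD's default is never used)
def pvPeaks (seq : List Int) : List Int :=
  (PySem.List.pyRange 1 ((seq.length : Int) - 1) 1).filter fun j =>
    decide (PySem.List.pyGetD seq (j - 1) 0 < PySem.List.pyGetD seq j 0 ∧
            PySem.List.pyGetD seq j 0 > PySem.List.pyGetD seq (j + 1) 0)

-- the hand-written binary search: while lo < hi: mid = (lo+hi)//2; ...
-- (lo, hi are nonnegative ints with hi ≤ len(peaks), so Python's // 2 is Nat division and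
-- peaks[mid] is the in-range element; getD's default is never used)
def pvBis (peaks : List Int) (i : Int) (lo hi : Nat) : Nat :=
  if _h : lo < hi then
    let mid := (lo + hi) / 2
    if peaks.getD mid 0 ≤ i then pvBis peaks i (mid + 1) hi else pvBis peaks i lo mid
  else lo
termination_by hi - lo
decreasing_by all_goals omega

-- res.append(lo) over i in range(n)
def calc_prefix_peaks_alt (seq : List Int) : List Int :=
  if (seq.length : Int) < 3 then []
  else (PySem.List.pyRange 0 (seq.length : Int) 1).map fun i =>
    ((pvBis (pvPeaks seq) i 0 (pvPeaks seq).length : Nat) : Int)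

-- ===== PRECONDITION & SPEC =====
def Spec_calc_prefix_peaks (seq : List Int) (out : List Int) : Prop := out = calc_prefix_peaks_alt seq
instance (seq : List Int) (out : List Int) : Decidable (Spec_calc_prefix_peaks seq out) := by unfold Spec_calc_prefix_peaks; infer_instance

-- ===== CLAIM (what is proved, stated in full; the proofs are below) =====
def Claim_equal_calc_prefix_peaks : Prop := ∀ (seq : List Int), Dom_calc_prefix_peaks seq → Spec_calc_prefix_peaks seq (calc_prefix_peaks seq)

-- ===== LEMMAS AND PROOFS =====

-- the peak indicator on triples, and on raw indices (t = triple index, peak position t+1)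
def pvPred (t : (Int × Int) × Int) : Bool := decide (t.1.1 < t.1.2 ∧ t.1.2 > t.2)

def pvPk (seq : List Int) (t : Nat) : Bool :=
  decide (seq.getD t 0 < seq.getD (t + 1) 0 ∧ seq.getD (t + 1) 0 > seq.getD (t + 2) 0)

def pvStep (c : Int) (t : (Int × Int) × Int) : Int := if t.1.1 < t.1.2 ∧ t.1.2 > t.2 then c + 1 else c

def pvCounts : List ((Int × Int) × Int) → Int → List Int
  | [], _ => []
  | t :: ts, c => pvStep c t :: pvCounts ts (pvStep c t)

def pvLastC : List ((Int × Int) × Int) → Int → Int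
  | [], c => c
  | t :: ts, c => pvLastC ts (pvStep c t)

theorem pvALoop_eq (ts : List ((Int × Int) × Int)) (res : List Int) (c : Int) :
    pvALoop ts res c = (res ++ pvCounts ts c, pvLastC ts c) := by
  induction ts generalizing res c with
  | nil => simp [pvALoop, pvCounts, pvLastC]
  | cons t ts ih =>
    obtain ⟨⟨l, p⟩, r⟩ := t
    simp [pvALoop, pvCounts, pvLastC, ih, pvStep]

theorem pvStep_eq (c : Int) (t : (Int × Int) × Int) :
    pvStep c t = c + (if pvPred t then 1 else 0) := by
  unfold pvStep pvPred; split <;> simp_all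

theorem pvLastC_eq (ts : List ((Int × Int) × Int)) (c : Int) :
    pvLastC ts c = c + (ts.countP pvPred : Int) := by
  induction ts generalizing c with
  | nil => simp [pvLastC]
  | cons t ts ih =>
    rw [pvLastC, ih, pvStep_eq, List.countP_cons]
    split <;> push_cast <;> ring

theorem pvCounts_eq (ts : List ((Int × Int) × Int)) (c : Int) :
    pvCounts ts c = (List.range ts.length).map
      (fun k => c + (((ts.take (k + 1)).countP pvPred : Nat) : Int)) := by
  induction ts generalizing c with
  | nil => simp [pvCounts]
  | cons t ts ih =>
    rw [pvCounts, ih, List.length_cons, List.range_succ_eq_map, List.map_cons, List.map_map]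
    congr 1
    · rw [pvStep_eq]
      simp only [List.take_succ_cons, List.take_zero, List.countP_cons, List.countP_nil]
      split <;> simp
    · apply List.map_congr_left
      intro k _
      simp only [Function.comp_apply, Nat.succ_eq_add_one, List.take_succ_cons, List.countP_cons,
        pvStep_eq]
      split <;> push_cast <;> ring

-- A's zipped triple list, written as a map over triple indices
theorem pvTriples_eq (seq : List Int) :
    (seq.zip (PySem.List.slice seq (some 1) none)).zip (PySem.List.slice seq (some 2) none)
      = (List.range (seq.length - 2)).map
          (fun t => ((seq.getD t 0, seq.getD (t + 1) 0), seq.getD (t + 2) 0)) := by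
  have h1 : PySem.List.slice seq (some 1) none = seq.drop 1 := by
    simpa using PySem.List.slice_from_natCast seq 1
  have h2 : PySem.List.slice seq (some 2) none = seq.drop 2 := by
    simpa using PySem.List.slice_from_natCast seq 2
  rw [h1, h2]
  apply List.ext_getElem
  · simp; omega
  · intro k hk1 hk2
    have hkn : k + 2 < seq.length := by
      simp [List.length_zip] at hk1; omega
    simp only [List.getElem_zip, List.getElem_drop, List.getElem_map, List.getElem_range]
    rw [List.getD_eq_getElem seq 0 (by omega : k < seq.length),
        List.getD_eq_getElem seq 0 (by omega : k + 1 < seq.length),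
        List.getD_eq_getElem seq 0 (by omega : k + 2 < seq.length)]
    simp [Nat.add_comm]

theorem pvPred_comp (seq : List Int) :
    (pvPred ∘ fun t => ((seq.getD t 0, seq.getD (t + 1) 0), seq.getD (t + 2) 0))
      = pvPk seq := rfl

-- B's peak-position list, written as a filtered index range
theorem pvPeaks_eq (seq : List Int) :
    pvPeaks seq = ((List.range (seq.length - 2)).filter (pvPk seq)).map (fun (k : Nat) => 1 + (k : Int)) := by
  unfold pvPeaks
  rw [PySem.List.pyRange_one]
  have ht : (((seq.length : Int) - 1) - 1).toNat = seq.length - 2 := by omega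
  rw [ht, List.filter_map]
  refine congrArg _ (List.filter_congr ?_)
  intro k _
  have e1 : (1 : Int) + (k : Int) - 1 = ((k : Nat) : Int) := by ring
  have e2 : (1 : Int) + (k : Int) = ((k + 1 : Nat) : Int) := by push_cast; ring
  have e3 : ((k + 1 : Nat) : Int) + 1 = ((k + 2 : Nat) : Int) := by push_cast; ring
  have e4 : ((k + 1 : Nat) : Int) - 1 = ((k : Nat) : Int) := by push_cast; ring
  simp only [Function.comp_apply, e2, e3, e4, PySem.List.pyGetD_natCast, pvPk]

-- B's per-index count, over the index range
theorem pvCountLE (seq : List Int) (i : Int) :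
    (pvPeaks seq).countP (fun p => decide (p ≤ i))
      = (List.range (seq.length - 2)).countP (fun (t : Nat) => decide (1 + (t : Int) ≤ i) && pvPk seq t) := by
  rw [pvPeaks_eq, List.countP_map, List.countP_filter]
  apply List.countP_congr
  intro a _
  simp

-- restricting a bounded-index count to the prefix of the range
theorem pvCountR (p : Nat → Bool) (m N : Nat) (h : m ≤ N) :
    (List.range N).countP (fun t => decide (t < m) && p t) = (List.range m).countP p := by
  obtain ⟨d, rfl⟩ : ∃ d, N = m + d := ⟨N - m, by omega⟩
  rw [List.range_add, List.countP_append]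
  have h1 : (List.range m).countP (fun t => decide (t < m) && p t) = (List.range m).countP p := by
    apply List.countP_congr
    intro a ha
    simp [List.mem_range.mp ha]
  have h2 : ((List.range d).map (m + ·)).countP (fun t => decide (t < m) && p t) = 0 := by
    rw [List.countP_map]
    apply List.countP_eq_zero.mpr
    intro a _
    simp
  rw [h1, h2, Nat.add_zero]

-- monotone access into a (≤)-sorted list
theorem pvSorted_getD (peaks : List Int) (hs : List.Pairwise (· ≤ ·) peaks)
    (t u : Nat) (hu : u < peaks.length) (htu : t ≤ u) :
    peaks.getD t 0 ≤ peaks.getD u 0 := by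
  rw [List.getD_eq_getElem peaks 0 (by omega : t < peaks.length),
      List.getD_eq_getElem peaks 0 hu]
  rcases Nat.lt_or_eq_of_le htu with hlt | rfl
  · exact List.pairwise_iff_getElem.mp hs t u (by omega) hu hlt
  · exact le_refl _

-- the binary search returns the number of elements ≤ i, given the bracketing invariant
theorem pvBis_count (peaks : List Int) (i : Int) (hs : List.Pairwise (· ≤ ·) peaks) :
    ∀ (n lo hi : Nat), hi - lo = n → hi ≤ peaks.length → lo ≤ hi →
      (∀ t, t < lo → peaks.getD t 0 ≤ i) →
      (∀ t, hi ≤ t → t < peaks.length → ¬ peaks.getD t 0 ≤ i) →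
      pvBis peaks i lo hi = peaks.countP (fun p => decide (p ≤ i)) := by
  intro n
  induction n using Nat.strong_induction_on with
  | _ n ih =>
    intro lo hi hn hhi hlo hl hr
    rw [pvBis]
    by_cases h : lo < hi
    · rw [dif_pos h]
      by_cases hc : peaks.getD ((lo + hi) / 2) 0 ≤ i
      · rw [if_pos hc]
        refine ih (hi - ((lo + hi) / 2 + 1)) (by omega) _ hi rfl hhi (by omega) ?_ hr
        intro t ht
        exact le_trans (pvSorted_getD peaks hs t ((lo + hi) / 2) (by omega) (by omega)) hc
      · rw [if_neg hc]
        refine ih ((lo + hi) / 2 - lo) (by omega) lo _ rfl (by omega) (by omega) hl ?_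
        intro t hmt htlen hti
        exact hc (le_trans (pvSorted_getD peaks hs ((lo + hi) / 2) t htlen hmt) hti)
    · rw [dif_neg h]
      have hle : lo = hi := by omega
      subst hle
      have hcount : peaks.countP (fun p => decide (p ≤ i)) = lo := by
        conv_lhs => rw [← List.take_append_drop lo peaks]
        rw [List.countP_append]
        have h1 : (peaks.take lo).countP (fun p => decide (p ≤ i)) = (peaks.take lo).length := by
          apply List.countP_eq_length.mpr
          intro a ha
          obtain ⟨t, htl, rfl⟩ := List.mem_iff_getElem.mp ha
          rw [List.getElem_take]
          have htlo : t < lo := by simp at htl; omega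
          have := hl t htlo
          rw [List.getD_eq_getElem peaks 0 (by simp at htl; omega)] at this
          simpa using this
        have h2 : (peaks.drop lo).countP (fun p => decide (p ≤ i)) = 0 := by
          apply List.countP_eq_zero.mpr
          intro a ha
          obtain ⟨t, htl, rfl⟩ := List.mem_iff_getElem.mp ha
          rw [List.getElem_drop]
          have hlen : lo + t < peaks.length := by simp at htl; omega
          have := hr (lo + t) (by omega) hlen
          rw [List.getD_eq_getElem peaks 0 hlen] at this
          simpa using this
        rw [h1, h2, List.length_take]
        omega
      omega

-- the peak-position list is sorted, so each output entry is the count of peak positions ≤ i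
theorem pvBis_eq_countP (seq : List Int) (i : Int) :
    pvBis (pvPeaks seq) i 0 (pvPeaks seq).length
      = (pvPeaks seq).countP (fun p => decide (p ≤ i)) := by
  have hs : List.Pairwise (· ≤ ·) (pvPeaks seq) := by
    rw [pvPeaks_eq]
    apply List.pairwise_map.mpr
    exact ((List.pairwise_lt_range).filter (pvPk seq)).imp
      (fun hab => by omega)
  exact pvBis_count (pvPeaks seq) i hs (pvPeaks seq).length 0 (pvPeaks seq).length rfl
    (le_refl _) (by omega) (by omega) (by omega)

theorem pv_main (seq : List Int) : calc_prefix_peaks seq = calc_prefix_peaks_alt seq := by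
  unfold calc_prefix_peaks calc_prefix_peaks_alt
  by_cases h : seq.length < 3
  · have h' : (seq.length : Int) < 3 := by exact_mod_cast h
    simp [h, h']
  · have h3 : 3 ≤ seq.length := by omega
    have h' : ¬ (seq.length : Int) < 3 := by exact_mod_cast h
    simp only [h, h', if_false]
    rw [pvALoop_eq, pvTriples_eq]
    set m := seq.length - 2 with hm
    rw [pvCounts_eq, pvLastC_eq, PySem.List.pyRange_one]
    simp only [pvBis_eq_countP]
    have ht : ((seq.length : Int) - 0).toNat = m + 1 + 1 := by omega
    rw [ht, List.range_succ, List.range_succ_eq_map]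
    simp only [List.length_map, List.length_range, List.map_append, List.map_cons, List.map_map,
      List.map_nil, List.cons_append, List.nil_append, Nat.cast_zero, zero_add]
    congr 1
    · -- output index 0: no peak position is ≤ 0
      rw [pvCountLE, ← hm]
      have hz : (List.range m).countP
          (fun (t : Nat) => decide (1 + (t : Int) ≤ 0) && pvPk seq t) = 0 := by
        apply List.countP_eq_zero.mpr
        intro a _
        have hx : ¬ (1 + (a : Int) ≤ 0) := by omega
        simp [hx]
      rw [hz]
      simp
    · congr 1
      · -- output indices 1..m (the triple positions)
        apply List.map_congr_left
        intro k hk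
        have hkm : k < m := List.mem_range.mp hk
        simp only [Function.comp_apply]
        simp only [Nat.succ_eq_add_one, Nat.cast_add, Nat.cast_one]
        rw [← List.map_take, List.take_range, List.countP_map, pvPred_comp,
          pvCountLE seq ((k : Int) + 1), ← hm]
        have hc : (List.range m).countP
              (fun (t : Nat) => decide (1 + (t : Int) ≤ (k : Int) + 1) && pvPk seq t)
            = (List.range m).countP (fun (t : Nat) => decide (t < k + 1) && pvPk seq t) := by
          apply List.countP_congr
          intro a _
          have hiff : (1 + (a : Int) ≤ (k : Int) + 1) ↔ a < k + 1 := by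
            constructor <;> intro hx
            · exact_mod_cast (by omega : (a : Int) < (k : Int) + 1)
            · omega
          simp [hiff]
        rw [hc, pvCountR _ _ _ (by omega : k + 1 ≤ m)]
        have hmin : min (k + 1) m = k + 1 := by omega
        rw [hmin]
      · -- output index m + 1 (the duplicated final count)
        rw [List.countP_map, pvPred_comp, pvCountLE, ← hm]
        have hc : (List.range m).countP
              (fun (t : Nat) => decide (1 + (t : Int) ≤ ((m + 1 : Nat) : Int)) && pvPk seq t)
            = (List.range m).countP (pvPk seq) := by
          apply List.countP_congr
          intro a ha
          have haa : a < m := List.mem_range.mp ha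
          simp only [Bool.and_eq_true, decide_eq_true_eq]
          constructor
          · exact fun hx => hx.2
          · intro hx
            exact ⟨by push_cast; omega, hx⟩
        rw [hc]

-- ===== VERDICT (by name: the statement is the Claim_ definition above) =====
theorem calc_prefix_peaks_spec : Claim_equal_calc_prefix_peaks := by
  intro seq _
  unfold Spec_calc_prefix_peaks
  exact pv_main seq
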